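-- pv_equiv track=rewrite | github.com/hukaidong/OctLearn | octLearn/dataset_cubes/torch_dataset.py | distributeIds
-- ===== SOURCE A (Python) =====
-- def distributeIds(data, num_workers, worker_index, data_limit=0):
--     it = enumerate(iter(data))
--     try:
--         for i in range(worker_index):
--             next(it)
--         while True:
--             data_index, data = next(it)
--             if data_limit > 0 and data_index > data_limit:
--                 return
--             yield data
--             for i in range(num_workers - 1):
--                 next(it)
--     except StopIteration:
--         return
-- ===== SOURCE B (Python) =====
-- def distributeIds(data, num_workers, worker_index, data_limit=0):
--     seq = list(data)
--     start = max(0, worker_index)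
--     step = max(1, num_workers)
--     end = len(seq) if data_limit <= 0 else min(len(seq), data_limit + 1)
--     i = start
--     while i < end:
--         yield seq[i]
--         i += step
-- ===== Notes on version B (the rewrite author's own statement) =====
-- stated objective: simpler
-- what changed: A interleaves skipping and limit-testing inside a generator driven by next() on an enumerate iterator; B precomputes start=max(0,worker_index), step=max(1,num_workers) and an end index capped by data_limit once, then runs a single plain index loop over the list.
import Mathlib
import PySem

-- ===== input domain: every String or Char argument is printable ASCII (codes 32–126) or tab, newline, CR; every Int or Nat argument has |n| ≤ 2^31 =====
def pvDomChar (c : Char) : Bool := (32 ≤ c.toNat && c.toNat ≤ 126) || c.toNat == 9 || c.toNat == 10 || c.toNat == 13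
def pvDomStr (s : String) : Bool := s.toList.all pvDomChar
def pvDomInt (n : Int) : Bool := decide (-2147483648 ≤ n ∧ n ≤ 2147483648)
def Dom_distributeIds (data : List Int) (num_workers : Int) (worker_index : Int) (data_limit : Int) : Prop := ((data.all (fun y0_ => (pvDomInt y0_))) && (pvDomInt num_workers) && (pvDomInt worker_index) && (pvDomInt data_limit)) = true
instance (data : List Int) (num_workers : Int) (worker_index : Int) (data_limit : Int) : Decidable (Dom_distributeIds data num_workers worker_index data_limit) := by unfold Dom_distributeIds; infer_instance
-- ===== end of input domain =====

-- B replaces A's iterator-skipping generator (enumerate + next-loops + in-loop limit test)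
-- by precomputed start/step/end bounds and one plain index loop; objective: simpler.

-- ===== PORT A =====
-- the `while True: next(it) …` generator loop over the enumerate iterator; a failing
-- `next` (empty list, or a skip running off the end) is the StopIteration → return []
def pvALoop (it : List (Int × Int)) (num_workers data_limit : Int) : List Int :=
  match it with
  | [] => []
  | (i, v) :: rest =>
    if data_limit > 0 ∧ i > data_limit then []
    else v :: pvALoop (rest.drop (num_workers - 1).toNat) num_workers data_limit
termination_by it.length
decreasing_by simp only [List.length_drop, List.length_cons]; omega

def distributeIds (data : List Int) (num_workers : Int) (worker_index : Int) (data_limit : Int) : List Int :=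
  -- `for i in range(worker_index): next(it)` consumes max(0,worker_index) pairs (drop)
  pvALoop ((PySem.List.enumerate data 0).drop worker_index.toNat) num_workers data_limit

-- ===== PORT B =====
-- `while i < end: yield seq[i]; i += step`; step = max 1 n ≥ 1 is passed as k + 1
def pvBLoop (seq : List Int) (e : Int) (k : Nat) (i : Int) : List Int :=
  if i < e then PySem.List.pyGetD seq i 0 :: pvBLoop seq e k (i + (k + 1)) else []
termination_by (e - i).toNat
decreasing_by omega

def distributeIds_alt (data : List Int) (num_workers : Int) (worker_index : Int) (data_limit : Int) : List Int :=
  let start : Int := max 0 worker_index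
  let step : Int := max 1 num_workers
  let e : Int := if data_limit ≤ 0 then (data.length : Int) else min (data.length : Int) (data_limit + 1)
  pvBLoop data e (step - 1).toNat start

-- ===== PRECONDITION & SPEC =====
def Spec_distributeIds (data : List Int) (num_workers : Int) (worker_index : Int) (data_limit : Int) (out : List Int) : Prop := out = distributeIds_alt data num_workers worker_index data_limit
instance (data : List Int) (num_workers : Int) (worker_index : Int) (data_limit : Int) (out : List Int) : Decidable (Spec_distributeIds data num_workers worker_index data_limit out) := by unfold Spec_distributeIds; infer_instance

-- ===== CLAIM (what is proved, stated in full; the proofs are below) =====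
def Claim_equal_distributeIds : Prop := ∀ (data : List Int) (num_workers : Int) (worker_index : Int) (data_limit : Int), Dom_distributeIds data num_workers worker_index data_limit → Spec_distributeIds data num_workers worker_index data_limit (distributeIds data num_workers worker_index data_limit)

-- ===== LEMMAS AND PROOFS =====

theorem pvALoop_nil (n l : Int) : pvALoop [] n l = [] := by
  rw [pvALoop.eq_def]

theorem pvALoop_cons (i v : Int) (rest : List (Int × Int)) (n l : Int) :
    pvALoop ((i, v) :: rest) n l =
      if l > 0 ∧ i > l then []
      else v :: pvALoop (rest.drop (n - 1).toNat) n l := by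
  rw [pvALoop.eq_def]

theorem pvBLoop_eq (seq : List Int) (e : Int) (k : Nat) (i : Int) :
    pvBLoop seq e k i =
      if i < e then PySem.List.pyGetD seq i 0 :: pvBLoop seq e k (i + (k + 1)) else [] := by
  rw [pvBLoop.eq_def]

theorem pv_drop_enumerate (xs : List Int) : ∀ (m : Nat) (s : Int),
    (PySem.List.enumerate xs s).drop m = PySem.List.enumerate (xs.drop m) (s + m) := by
  induction xs with
  | nil => intro m s; simp [PySem.List.enumerate_nil]
  | cons x xs ih =>
    intro m s
    cases m with
    | zero => simp
    | succ m =>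
      rw [PySem.List.enumerate_cons]
      simp only [List.drop_succ_cons]
      rw [ih m (s + 1)]
      congr 1
      push_cast
      ring

theorem pv_main (n l : Int) (data : List Int) (e : Int)
    (he : e = if l ≤ 0 then (data.length : Int) else min (data.length : Int) (l + 1)) :
    ∀ (m : Nat) (ds : List Int) (s : Nat), ds.length ≤ m → data.drop s = ds →
      pvALoop (PySem.List.enumerate ds s) n l = pvBLoop data e (n - 1).toNat s := by
  intro m
  induction m with
  | zero =>
    intro ds s hm hdrop
    have hds : ds = [] := List.eq_nil_of_length_eq_zero (Nat.le_zero.mp hm)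
    subst hds
    have hlen : data.length ≤ s := by
      by_contra h
      have := List.drop_eq_nil_iff.mp hdrop
      omega
    rw [PySem.List.enumerate_nil, pvALoop_nil, pvBLoop_eq]
    have : ¬ ((s : Int) < e) := by
      simp only [he]; split_ifs <;> push_cast <;> omega
    simp [this]
  | succ m ih =>
    intro ds s hm hdrop
    cases ds with
    | nil =>
      have hlen : data.length ≤ s := by
        by_contra h
        have := List.drop_eq_nil_iff.mp hdrop
        omega
      rw [PySem.List.enumerate_nil, pvALoop_nil, pvBLoop_eq]
      have : ¬ ((s : Int) < e) := by
        simp only [he]; split_ifs <;> push_cast <;> omega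
      simp [this]
    | cons v rest =>
      have hslen : s < data.length := by
        by_contra h
        have : data.drop s = [] := List.drop_eq_nil_iff.mpr (by omega)
        rw [hdrop] at this; exact List.cons_ne_nil _ _ this
      rw [PySem.List.enumerate_cons, pvALoop_cons]
      by_cases hstop : l > 0 ∧ (s : Int) > l
      · obtain ⟨h1, h2⟩ := hstop
        rw [if_pos ⟨h1, h2⟩, pvBLoop_eq]
        have : ¬ ((s : Int) < e) := by
          simp only [he]; split_ifs <;> push_cast <;> omega
        simp [this]
      · rw [if_neg hstop]
        have hsl : l ≤ 0 ∨ (s : Int) ≤ l := by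
          by_cases h : l ≤ 0
          · exact Or.inl h
          · refine Or.inr ?_
            by_contra hc
            exact hstop ⟨by omega, by omega⟩
        have hse : (s : Int) < e := by
          simp only [he]; split_ifs <;> push_cast <;> omega
        rw [pvBLoop_eq, if_pos hse]
        have hget : PySem.List.pyGetD data (s : Int) 0 = v := by
          rw [PySem.List.pyGetD_natCast]
          have : data.getD s 0 = (data.drop s).getD 0 0 := by
            simp [List.getD, List.getElem?_drop]
          rw [this, hdrop]; rfl
        rw [hget]
        congr 1
        rw [pv_drop_enumerate rest ((n - 1).toNat) ((s : Int) + 1)]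
        have hrest : data.drop (s + 1 + (n - 1).toNat) = rest.drop ((n - 1).toNat) := by
          have h1 : data.drop (s + 1) = rest := by
            have := congrArg List.tail hdrop
            simpa [List.tail_drop] using this
          rw [← h1, List.drop_drop]
          try (congr 1; omega)
        have := ih (rest.drop ((n - 1).toNat)) (s + 1 + (n - 1).toNat)
          (by simp at hm ⊢; omega) hrest
        have hcast : ((s : Int) + 1 + (((n - 1).toNat : Nat) : Int))
            = (((s + 1 + (n - 1).toNat : Nat)) : Int) := by push_cast; ring
        rw [hcast, this]
        congr 1
        push_cast
        ring

theorem distributeIds_spec : Claim_equal_distributeIds := by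
  unfold Claim_equal_distributeIds
  intro data n w l _
  simp only [Spec_distributeIds, distributeIds, distributeIds_alt]
  have hk : ((max 1 n : Int) - 1).toNat = (n - 1).toNat := by omega
  have hstart : (max 0 w : Int) = ((w.toNat : Nat) : Int) := by omega
  rw [hk, hstart, pv_drop_enumerate data w.toNat 0]
  have h0 : (0 : Int) + (w.toNat : Int) = (w.toNat : Int) := by ring
  rw [h0]
  exact pv_main n l data _ rfl (data.drop w.toNat).length (data.drop w.toNat) w.toNat le_rfl rfl
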